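-- pv_equiv track=rewrite | github.com/BearKidsTeam/virtools-shimmer | scripts/gen.py | decor_args
-- ===== SOURCE A (Python) =====
-- import itertools
-- from string import ascii_lowercase
--
-- def identifier_gen():
--     for size in itertools.count(1):
--         for s in itertools.product(ascii_lowercase, repeat=size):
--             yield "".join(s)
--
-- def strip_type(x):
--     return x.replace("class ", "").replace("struct ", "").replace("enum ", "")
--
-- def decor_args(argslist, add_identifier):
--     ret = list()
--     if argslist == ["void"]:
--         argslist.clear()
--     for arg, identifier in zip(argslist, identifier_gen()):
--         arg = strip_type(arg)
--         if arg.find("...") != -1 and add_identifier: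
--             raise ValueError("cannot add identifier to a variadic function")
--         if arg.find("(__cdecl *)") != -1:
--             arg = arg.replace("(__cdecl *)", f"(*{identifier})", 1)
--         elif add_identifier:
--             arg += f" {identifier}"
--         ret.append(arg)
--     return ", ".join(ret)
-- ===== SOURCE B (Python) =====
-- def _ident(i):
--     # bijective base-26 name for 0-based position i: a..z, aa, ab, ...
--     s = ""
--     n = i + 1
--     while n:
--         n, r = divmod(n - 1, 26)
--         s = chr(97 + r) + s
--     return s
--
--
-- def _decorate(arg, name, add_identifier):
--     for kw in ("class ", "struct ", "enum "):
--         arg = arg.replace(kw, "")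
--     if "..." in arg and add_identifier:
--         raise ValueError("cannot add identifier to a variadic function")
--     if "(__cdecl *)" in arg:
--         return arg.replace("(__cdecl *)", f"(*{name})", 1)
--     if add_identifier:
--         return arg + " " + name
--     return arg
--
--
-- def decor_args(argslist, add_identifier):
--     if argslist == ["void"]:
--         argslist.clear()
--     return ", ".join(
--         _decorate(arg, _ident(i), add_identifier) for i, arg in enumerate(argslist)
--     )
-- ===== Notes on version B (the rewrite author's own statement) =====
-- stated objective: idiomatic
-- what changed: B drops the lazy itertools.product identifier generator and the zip: it enumerates the argument list and computes each identifier directly from its index by bijective base-26 arithmetic (divmod), decorating each argument in a helper and joining; Pre_ excludes only the inputs where A raises ValueError (add_identifier with a variadic '...' argument), where B raises too.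
import Mathlib
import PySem

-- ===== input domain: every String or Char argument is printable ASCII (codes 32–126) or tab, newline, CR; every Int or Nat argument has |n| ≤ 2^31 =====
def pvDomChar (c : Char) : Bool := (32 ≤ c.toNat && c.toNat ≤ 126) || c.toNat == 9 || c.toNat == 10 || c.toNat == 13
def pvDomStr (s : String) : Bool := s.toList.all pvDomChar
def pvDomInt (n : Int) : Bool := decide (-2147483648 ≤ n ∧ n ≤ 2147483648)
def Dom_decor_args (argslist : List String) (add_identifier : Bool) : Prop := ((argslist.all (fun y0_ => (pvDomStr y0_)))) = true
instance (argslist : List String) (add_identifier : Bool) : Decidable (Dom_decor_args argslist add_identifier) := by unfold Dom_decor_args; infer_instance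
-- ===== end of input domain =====

-- B replaces A's lazy itertools.product identifier generator + zip with direct
-- bijective base-26 arithmetic on the enumerate index (objective: idiomatic, not faster).
-- Both A and B mutate argslist in place (clear it when it equals ["void"]); the
-- equivalence proved here is about the return value.

-- shared hand port of Python's str.replace(old, new, 1) for NONEMPTY old (both
-- sources call it with the literal "(__cdecl *)"): replace the first occurrence,
-- located by find (exact: Chars.find returns the first index, -1 when absent).
def replaceFirst (s old new : List Char) : List Char :=
  let i := PySem.Chars.find s old
  if i = -1 then s else s.take i.toNat ++ new ++ s.drop (i.toNat + old.length)

-- ===== PORT A =====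
-- ascii_lowercase
def lettersA : List Char := "abcdefghijklmnopqrstuvwxyz".toList

-- itertools.product(ascii_lowercase, repeat=size), in product order (library call)
def prodChars : Nat → List (List Char)
  | 0 => [[]]
  | k + 1 => (prodChars k).flatMap (fun s => lettersA.map (fun c => s ++ [c]))

-- strip_type
def stripC (x : List Char) : List Char :=
  PySem.Chars.replace (PySem.Chars.replace (PySem.Chars.replace x "class ".toList []) "struct ".toList []) "enum ".toList []

-- the lazy identifier_gen, consumed by zip: sizes 1, 2, … are materialised only
-- until n identifiers exist (fuel n suffices: each size adds at least one string)
def genGo (n : Nat) : Nat → Nat → List (List Char) → List (List Char)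
  | 0, _, acc => acc
  | fuel + 1, size, acc =>
      if n ≤ acc.length then acc else genGo n fuel (size + 1) (acc ++ prodChars size)

def identifiersA (n : Nat) : List (List Char) := (genGo n n 1 []).take n

def decor_args (argslist : List String) (add_identifier : Bool) : String :=
  let args := if argslist = ["void"] then [] else argslist
  let ret := (args.zip (identifiersA args.length)).foldl
    (fun ret p =>
      let arg := stripC p.1.toList
      ret ++ [if PySem.Chars.find arg "...".toList ≠ -1 ∧ add_identifier = true then
                arg   -- Python raises ValueError here; excluded by Pre_
              else if PySem.Chars.find arg "(__cdecl *)".toList ≠ -1 then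
                replaceFirst arg "(__cdecl *)".toList ("(*".toList ++ p.2 ++ ")".toList)
              else if add_identifier then arg ++ " ".toList ++ p.2
              else arg]) []
  String.ofList (PySem.Chars.join ", ".toList ret)

-- ===== PORT B =====
-- _ident's while loop (state n, s), as the obvious recursion on n
def identGo (n : Nat) (s : List Char) : List Char :=
  if n = 0 then s
  else identGo ((n - 1) / 26) (Char.ofNat (97 + (n - 1) % 26) :: s)
  termination_by n
  decreasing_by have := Nat.div_le_self (n - 1) 26; omega

def identB (i : Nat) : List Char := identGo (i + 1) []

-- _decorate
def decorateB (arg0 name : List Char) (add_identifier : Bool) : List Char :=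
  let arg := ["class ".toList, "struct ".toList, "enum ".toList].foldl
    (fun a kw => PySem.Chars.replace a kw []) arg0
  if PySem.Chars.isIn "...".toList arg && add_identifier then
    arg   -- Python raises ValueError here; excluded by Pre_
  else if PySem.Chars.isIn "(__cdecl *)".toList arg then
    replaceFirst arg "(__cdecl *)".toList ("(*".toList ++ name ++ ")".toList)
  else if add_identifier then arg ++ " ".toList ++ name
  else arg

def decor_args_alt (argslist : List String) (add_identifier : Bool) : String :=
  let args := if argslist = ["void"] then [] else argslist
  String.ofList (PySem.Chars.join ", ".toList
    ((PySem.List.enumerate args).map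
      (fun p => decorateB p.2.toList (identB p.1.toNat) add_identifier)))

-- ===== PRECONDITION & SPEC =====
-- Pre_ excludes exactly the inputs where A (and B alike) raises ValueError:
-- add_identifier together with a stripped argument containing "..." (variadic).
def Pre_decor_args (argslist : List String) (add_identifier : Bool) : Prop :=
  add_identifier = true →
    ∀ a ∈ (if argslist = ["void"] then [] else argslist),
      PySem.Chars.isIn "...".toList (stripC a.toList) = false
instance (argslist : List String) (add_identifier : Bool) : Decidable (Pre_decor_args argslist add_identifier) := by unfold Pre_decor_args; infer_instance

def pvWitness_decor_args : List String × Bool := (["int x", "class Foo *", "void (__cdecl *)"], true)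

def Spec_decor_args (argslist : List String) (add_identifier : Bool) (out : String) : Prop := out = decor_args_alt argslist add_identifier
instance (argslist : List String) (add_identifier : Bool) (out : String) : Decidable (Spec_decor_args argslist add_identifier out) := by unfold Spec_decor_args; infer_instance

-- ===== CLAIM (what is proved, stated in full; the proofs are below) =====
def Claim_equal_decor_args : Prop := ∀ (argslist : List String) (add_identifier : Bool), Dom_decor_args argslist add_identifier → Pre_decor_args argslist add_identifier → Spec_decor_args argslist add_identifier (decor_args argslist add_identifier)

-- ===== LEMMAS AND PROOFS =====

-- m in bijective base 26: the first identifier of size k is number baseN k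
def baseN : Nat → Nat
  | 0 => 0
  | k + 1 => 26 * baseN k + 1

lemma baseN_pow (k : Nat) : 25 * baseN k + 1 = 26 ^ k := by
  induction k with
  | zero => simp [baseN]
  | succ k ih => rw [baseN, pow_succ]; omega

lemma identGo_acc : ∀ (m : Nat) (s : List Char), identGo m s = identGo m [] ++ s := by
  intro m
  induction m using Nat.strong_induction_on with
  | _ m ih =>
    intro s
    conv_lhs => rw [identGo]
    conv_rhs => rw [identGo]
    by_cases h : m = 0
    · simp [h]
    · simp only [if_neg h]
      have hlt : (m - 1) / 26 < m := by have := Nat.div_le_self (m - 1) 26; omega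
      conv_rhs => rw [ih _ hlt]
      rw [ih _ hlt]
      simp

lemma identGo_unfold (m : Nat) (h : m ≠ 0) :
    identGo m [] = identGo ((m - 1) / 26) [] ++ [Char.ofNat (97 + (m - 1) % 26)] := by
  rw [identGo, if_neg h, identGo_acc]

lemma lettersA_eq : lettersA = (List.range 26).map (fun r => Char.ofNat (97 + r)) := by decide

lemma range_mul_flatMap (a b : Nat) (f : Nat → List Char) :
    (List.range (a * b)).map f
      = (List.range a).flatMap (fun q => (List.range b).map (fun r => f (q * b + r))) := by
  induction a with
  | zero => simp
  | succ a ih =>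
    rw [Nat.succ_mul, List.range_add, List.range_succ]
    simp only [List.map_append, List.flatMap_append, ih, List.map_map]
    simp [Function.comp_def, Nat.add_comm]

lemma prodChars_eq (k : Nat) :
    prodChars k = (List.range (26 ^ k)).map (fun j => identGo (baseN k + j) []) := by
  induction k with
  | zero =>
    show [[]] = List.map (fun j => identGo (baseN 0 + j) []) (List.range 1)
    rw [List.range_one, List.map_cons, List.map_nil]
    show [[]] = [identGo 0 []]
    rw [identGo]
    simp
  | succ k ih =>
    rw [prodChars, ih, lettersA_eq, pow_succ, range_mul_flatMap, List.flatMap_map]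
    congr 1
    funext q
    simp only [List.map_map]
    apply List.map_congr_left
    intro r hr
    have hr26 : r < 26 := List.mem_range.mp hr
    have hm : baseN (k + 1) + (q * 26 + r) ≠ 0 := by simp [baseN]
    have h1 : (baseN (k + 1) + (q * 26 + r) - 1) / 26 = baseN k + q := by
      simp only [baseN]; omega
    have h2 : (baseN (k + 1) + (q * 26 + r) - 1) % 26 = r := by
      simp only [baseN]; omega
    simp only [Function.comp_def]
    rw [identGo_unfold _ hm]
    rw [h1]
    rw [h2]

lemma genGo_spec (n : Nat) :
    ∀ (fuel size L : Nat), baseN size = L + 1 →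
      ∃ M, genGo n fuel size ((List.range L).map (fun i => identGo (i + 1) []))
              = (List.range M).map (fun i => identGo (i + 1) [])
           ∧ (n ≤ M ∨ L + fuel ≤ M) := by
  intro fuel
  induction fuel with
  | zero => intro size L h; exact ⟨L, rfl, Or.inr (by omega)⟩
  | succ fuel ih =>
    intro size L hbase
    rw [genGo]
    by_cases hlen : n ≤ ((List.range L).map (fun i => identGo (i + 1) [])).length
    · rw [if_pos hlen]
      exact ⟨L, rfl, Or.inl (by simpa using hlen)⟩
    · rw [if_neg hlen]
      have hgrow : (List.range L).map (fun i => identGo (i + 1) []) ++ prodChars size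
          = (List.range (L + 26 ^ size)).map (fun i => identGo (i + 1) []) := by
        rw [prodChars_eq, List.range_add, List.map_append, List.map_map]
        congr 1
        apply List.map_congr_left
        intro j _
        simp only [Function.comp_def]
        congr 1
        omega
      rw [hgrow]
      have hpow : 0 < 26 ^ size := pow_pos (by norm_num) _
      have hbase' : baseN (size + 1) = (L + 26 ^ size) + 1 := by
        have := baseN_pow size
        rw [baseN]; omega
      obtain ⟨M, heq, hor⟩ := ih (size + 1) (L + 26 ^ size) hbase'
      exact ⟨M, heq, by omega⟩

lemma identifiersA_eq (n : Nat) : identifiersA n = (List.range n).map identB := by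
  unfold identifiersA
  obtain ⟨M, heq, hor⟩ := genGo_spec n n 1 0 (by simp [baseN])
  have hnM : n ≤ M := by omega
  simp only [List.range_zero, List.map_nil] at heq
  rw [heq, ← List.map_take, List.take_range, Nat.min_eq_left hnM]
  rfl

-- A's loop body on one argument equals B's _decorate, given no-variadic (Pre_)
lemma elem_eq (a : String) (name : List Char) (add : Bool)
    (h : add = true → PySem.Chars.isIn "...".toList (stripC a.toList) = false) :
    (if PySem.Chars.find (stripC a.toList) "...".toList ≠ -1 ∧ add = true then
        stripC a.toList
      else if PySem.Chars.find (stripC a.toList) "(__cdecl *)".toList ≠ -1 then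
        replaceFirst (stripC a.toList) "(__cdecl *)".toList ("(*".toList ++ name ++ ")".toList)
      else if add then stripC a.toList ++ " ".toList ++ name
      else stripC a.toList)
      = decorateB a.toList name add := by
  have hbridge : ∀ sub : List Char, (PySem.Chars.find (stripC a.toList) sub ≠ -1)
      ↔ PySem.Chars.isIn sub (stripC a.toList) = true := by
    intro sub
    rw [PySem.Chars.isIn_iff_infix]
    constructor
    · intro hne
      by_contra hni
      exact hne ((PySem.Chars.find_eq_neg_one_iff _ _).mpr hni)
    · intro hinf heq
      exact (PySem.Chars.find_eq_neg_one_iff _ _).mp heq hinf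
  have hstrip : ["class ".toList, "struct ".toList, "enum ".toList].foldl
      (fun x kw => PySem.Chars.replace x kw []) a.toList = stripC a.toList := rfl
  simp only [decorateB, hstrip]
  by_cases hadd : add = true
  · subst hadd
    have hno := h rfl
    have hfindF : PySem.Chars.find (stripC a.toList) "...".toList = -1 := by
      by_contra hne
      have := (hbridge _).mp hne
      rw [hno] at this
      exact Bool.noConfusion this
    have hfindF' : PySem.Chars.find (stripC a.toList) ['.', '.', '.'] = -1 := hfindF
    rw [if_neg (by simp [hfindF'])]
    simp only [Bool.and_true, hno, Bool.false_eq_true, if_false]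
    by_cases hc : PySem.Chars.isIn "(__cdecl *)".toList (stripC a.toList) = true
    · rw [if_pos ((hbridge _).mpr hc), if_pos hc]
    · rw [if_neg (fun hx => hc ((hbridge _).mp hx)), if_neg hc]
  · have hadd' : add = false := by cases add <;> simp_all
    subst hadd'
    simp only [Bool.and_false, Bool.false_eq_true, if_false, and_false]
    by_cases hc : PySem.Chars.isIn "(__cdecl *)".toList (stripC a.toList) = true
    · rw [if_pos ((hbridge _).mpr hc), if_pos hc]
    · rw [if_neg (fun hx => hc ((hbridge _).mp hx)), if_neg hc]

lemma zip_enumerate (E : String → List Char → List Char) :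
    ∀ (xs : List String) (k : Nat),
      (xs.zip ((List.range xs.length).map (fun i => identB (k + i)))).map
          (fun p => E p.1 p.2)
        = (PySem.List.enumerate xs (k : Int)).map (fun p => E p.2 (identB p.1.toNat)) := by
  intro xs
  induction xs with
  | nil => intro k; simp [PySem.List.enumerate_nil]
  | cons x t ih =>
    intro k
    rw [PySem.List.enumerate_cons]
    simp only [List.length_cons, List.range_succ_eq_map, List.map_cons, List.map_map,
      List.zip_cons_cons]
    have hfun : ((fun i => identB (k + i)) ∘ Nat.succ) = (fun i => identB ((k + 1) + i)) := by
      funext i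
      show identB (k + (i + 1)) = identB ((k + 1) + i)
      congr 1
      omega
    rw [hfun, ih (k + 1)]
    have hk : ((k : Int) + 1) = ((k + 1 : Nat) : Int) := by push_cast; ring
    rw [hk]
    simp

-- ===== VERDICT (by name: the statement is the Claim_ definition above) =====
theorem decor_args_spec : Claim_equal_decor_args := by
  intro argslist add_identifier _hdom hpre
  unfold Spec_decor_args
  simp only [decor_args, decor_args_alt]
  set args := if argslist = ["void"] then [] else argslist with hargs
  have hpre' : add_identifier = true →
      ∀ a ∈ args, PySem.Chars.isIn "...".toList (stripC a.toList) = false := hpre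
  congr 1
  congr 1
  rw [PySem.List.foldl_append_singleton_eq_map]
  rw [identifiersA_eq]
  have h0 : (List.range args.length).map identB
      = (List.range args.length).map (fun i => identB (0 + i)) := by simp
  rw [h0]
  rw [List.map_congr_left (l := args.zip _) (f := _)
    (g := fun p => decorateB p.1.toList p.2 add_identifier)
    (fun p hp => elem_eq p.1 p.2 add_identifier
      (fun ha => hpre' ha p.1 (List.of_mem_zip hp).1))]
  have := zip_enumerate (fun s name => decorateB s.toList name add_identifier) args 0
  simpa using this
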